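-- pv_equiv track=rewrite | github.com/maxplanck-ie/parkour | library_sample_shared/utils.py | move_other_to_end
-- ===== SOURCE A (Python) =====
-- def move_other_to_end(data):
--     """ Move 'Other' option to the end of the list. """
--     result = []
--     result.extend(data)
--
--     other = [x for x in result if x['name'] == 'Other']
--     if other:
--         index = result.index(other[0])
--         result.append(result.pop(index))
--
--     return result
-- ===== SOURCE B (Python) =====
-- def move_other_to_end(data):
--     """ Move 'Other' option to the end of the list. """
--     rest = []
--     moved = None
--     for x in data:
--         if x['name'] == 'Other' and moved is None:
--             moved = x
--         else:
--             rest.append(x)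
--     if moved is not None:
--         rest.append(moved)
--     return rest
-- ===== Notes on version B (the rewrite author's own statement) =====
-- stated objective: simpler
-- what changed: Replaces copy + filter-comprehension + index + pop + append with one pass that holds the first 'Other' element aside and appends it at the end.
import Mathlib
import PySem

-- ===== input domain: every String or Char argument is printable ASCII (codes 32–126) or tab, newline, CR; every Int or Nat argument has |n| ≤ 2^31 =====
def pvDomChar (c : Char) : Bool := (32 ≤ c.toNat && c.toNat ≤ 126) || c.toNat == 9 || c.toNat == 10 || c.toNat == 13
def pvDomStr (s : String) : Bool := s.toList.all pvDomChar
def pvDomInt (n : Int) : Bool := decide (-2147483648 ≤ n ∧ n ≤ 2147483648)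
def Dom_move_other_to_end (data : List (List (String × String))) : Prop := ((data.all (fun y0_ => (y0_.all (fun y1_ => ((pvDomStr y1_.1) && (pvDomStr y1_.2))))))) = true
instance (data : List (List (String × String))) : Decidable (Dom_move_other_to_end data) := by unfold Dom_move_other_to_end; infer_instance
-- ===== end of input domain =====

-- B replaces A's copy + filter + index + pop with a single pass holding the first 'Other' aside (simpler, one traversal).


-- x['name']: first-match lookup in the association list; Pre_ guarantees the key is present,
-- so the "" default is never reached on admitted inputs.
def pvGetName (x : List (String × String)) : String :=
  ((x.find? (fun p => p.1 == "name")).map (·.2)).getD ""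

-- ===== PORT A =====
def move_other_to_end (data : List (List (String × String))) : List (List (String × String)) :=
  let result := ([] : List (List (String × String))) ++ data
  let other := result.filter (fun x => pvGetName x == "Other")
  match other with
  | [] => result
  | o :: _ =>
    match PySem.List.index? result o with
    | none => result                       -- unreachable: o ∈ result
    | some i =>
      match PySem.List.pop? result (i : Int) with
      | none => result                     -- unreachable: i < result.length
      | some (v, rest) => rest ++ [v]

-- ===== PORT B =====
def move_other_to_end_alt (data : List (List (String × String))) : List (List (String × String)) :=
  let st := data.foldl
    (fun (st : List (List (String × String)) × Option (List (String × String))) x =>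
      if pvGetName x == "Other" && st.2.isNone then (st.1, some x)
      else (st.1 ++ [x], st.2))
    ([], none)
  match st with
  | (rest, some moved) => rest ++ [moved]
  | (rest, none) => rest

-- ===== PRECONDITION & SPEC =====
-- A evaluates x['name'] for every element; it raises KeyError when some dict lacks the key 'name'.
def Pre_move_other_to_end (data : List (List (String × String))) : Prop :=
  (data.all (fun x => x.any (fun p => p.1 == "name"))) = true
instance (data : List (List (String × String))) : Decidable (Pre_move_other_to_end data) := by unfold Pre_move_other_to_end; infer_instance
def pvWitness_move_other_to_end : (List (List (String × String))) :=
  [[("name", "A")], [("name", "Other")], [("name", "B")]]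
def Spec_move_other_to_end (data : List (List (String × String))) (out : List (List (String × String))) : Prop := out = move_other_to_end_alt data
instance (data : List (List (String × String))) (out : List (List (String × String))) : Decidable (Spec_move_other_to_end data out) := by unfold Spec_move_other_to_end; infer_instance

-- ===== CLAIM (what is proved, stated in full; the proofs are below) =====
def Claim_equal_move_other_to_end : Prop := ∀ (data : List (List (String × String))), Dom_move_other_to_end data → Pre_move_other_to_end data → Spec_move_other_to_end data (move_other_to_end data)

-- ===== LEMMAS AND PROOFS =====

-- common reference shape: move the first 'Other' to the end
def pvSpec : List (List (String × String)) → List (List (String × String))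
  | [] => []
  | x :: xs => if pvGetName x == "Other" then xs ++ [x] else x :: pvSpec xs

lemma pvSpec_of_no_other (xs : List (List (String × String)))
    (h : xs.filter (fun x => pvGetName x == "Other") = []) : pvSpec xs = xs := by
  induction xs with
  | nil => rfl
  | cons x xs ih =>
    simp only [List.filter_cons] at h
    by_cases hx : pvGetName x == "Other"
    · simp [hx] at h
    · simp only [pvSpec, hx]
      simp only [hx, Bool.false_eq_true, if_false] at h
      simp [ih h]

lemma portA_eq_pvSpec (data : List (List (String × String))) :
    move_other_to_end data = pvSpec data := by
  induction data with
  | nil => rfl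
  | cons x xs ih =>
    unfold move_other_to_end
    simp only [List.nil_append, List.filter_cons]
    by_cases hx : pvGetName x == "Other"
    · rw [if_pos hx]
      dsimp only
      rw [PySem.List.index?_cons_self]
      dsimp only
      simp [pvSpec, hx, PySem.List.pop?_zero_cons]
    · rw [if_neg hx]
      rcases hfil : xs.filter (fun x => pvGetName x == "Other") with _ | ⟨o, t⟩
      · dsimp only
        simp [pvSpec, hx, pvSpec_of_no_other xs hfil]
      · dsimp only
        have homem := hfil ▸ List.mem_cons_self (a := o) (l := t)
        have ho : (pvGetName o == "Other") = true := (List.mem_filter.mp homem).2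
        have hmem : o ∈ xs := (List.mem_filter.mp homem).1
        have hne : x ≠ o := by intro h; rw [h] at hx; exact hx ho
        obtain ⟨i, hi⟩ := Option.isSome_iff_exists.mp
          ((PySem.List.index?_isSome_iff xs o).mpr hmem)
        obtain ⟨hilt, -, -⟩ := PySem.List.getElem_of_index?_eq_some hi
        rw [PySem.List.index?_cons_of_ne xs hne, hi, Option.map_some]
        dsimp only
        rw [PySem.List.pop?_natCast (x :: xs) (i + 1) (by simpa using Nat.succ_lt_succ hilt)]
        dsimp only
        have hA : move_other_to_end xs = xs.eraseIdx i ++ [xs[i]] := by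
          unfold move_other_to_end
          simp only [List.nil_append, hfil]
          rw [hi]
          dsimp only
          rw [PySem.List.pop?_natCast xs i hilt]
        simp only [pvSpec, hx, Bool.false_eq_true, if_false,
          List.eraseIdx_cons_succ, List.getElem_cons_succ, List.cons_append]
        rw [← ih, hA]

lemma portB_fold_some (xs : List (List (String × String)))
    (rest : List (List (String × String))) (m : List (String × String)) :
    xs.foldl
      (fun (st : List (List (String × String)) × Option (List (String × String))) x =>
        if pvGetName x == "Other" && st.2.isNone then (st.1, some x)
        else (st.1 ++ [x], st.2))
      (rest, some m) = (rest ++ xs, some m) := by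
  induction xs generalizing rest with
  | nil => simp
  | cons x xs ih =>
    simp only [List.foldl_cons, Option.isNone_some, Bool.and_false,
      Bool.false_eq_true, if_false]
    rw [ih]
    simp

lemma portB_fold_none (xs : List (List (String × String)))
    (rest : List (List (String × String))) :
    (match (xs.foldl
      (fun (st : List (List (String × String)) × Option (List (String × String))) x =>
        if pvGetName x == "Other" && st.2.isNone then (st.1, some x)
        else (st.1 ++ [x], st.2))
      (rest, none)) with
     | (acc, some m) => acc ++ [m]
     | (acc, none) => acc) = rest ++ pvSpec xs := by
  induction xs generalizing rest with
  | nil => simp [pvSpec]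
  | cons x xs ih =>
    simp only [List.foldl_cons, Option.isNone_none, Bool.and_true]
    by_cases hx : pvGetName x == "Other"
    · rw [if_pos hx, portB_fold_some]
      simp [pvSpec, hx]
    · rw [if_neg hx, ih (rest ++ [x])]
      simp [pvSpec, hx]

lemma portB_eq_pvSpec (data : List (List (String × String))) :
    move_other_to_end_alt data = pvSpec data := by
  have h := portB_fold_none data []
  simpa [move_other_to_end_alt] using h

-- ===== VERDICT (by name: the statement is the Claim_ definition above) =====
theorem move_other_to_end_spec : Claim_equal_move_other_to_end := by
  intro data _ _
  unfold Spec_move_other_to_end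
  rw [portA_eq_pvSpec, portB_eq_pvSpec]
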